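-- pv_equiv track=rewrite | github.com/deeplearningmethods/deep-learning-pdes | 1_Modules/utils.py | swap_order
-- ===== SOURCE A (Python) =====
-- def swap_order(dictionary, key1, key2):
--     # Check if both keys are in the dictionary
--     if key1 not in dictionary or key2 not in dictionary:
--         raise ValueError("Both keys must be in the dictionary")
--
--     new_dict = {}
--     for key in dictionary:
--         new_key = key1 if key == key2 else key2 if key == key1 else key
--         new_dict[new_key] = dictionary[new_key]
--
--     return new_dict
-- ===== SOURCE B (Python) =====
-- def swap_order(dictionary, key1, key2):
--     # Check if both keys are in the dictionary
--     if key1 not in dictionary or key2 not in dictionary: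
--         raise ValueError("Both keys must be in the dictionary")
--
--     keys = list(dictionary)
--     i, j = keys.index(key1), keys.index(key2)
--     keys[i], keys[j] = keys[j], keys[i]
--     return {k: dictionary[k] for k in keys}
-- ===== Notes on version B (the rewrite author's own statement) =====
-- stated objective: simpler
-- what changed: B computes the final key ordering up front (list the keys, find both indices, swap the two positions) and materializes the result in one comprehension, instead of A's loop that conditionally renames each key while inserting.
import Mathlib
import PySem

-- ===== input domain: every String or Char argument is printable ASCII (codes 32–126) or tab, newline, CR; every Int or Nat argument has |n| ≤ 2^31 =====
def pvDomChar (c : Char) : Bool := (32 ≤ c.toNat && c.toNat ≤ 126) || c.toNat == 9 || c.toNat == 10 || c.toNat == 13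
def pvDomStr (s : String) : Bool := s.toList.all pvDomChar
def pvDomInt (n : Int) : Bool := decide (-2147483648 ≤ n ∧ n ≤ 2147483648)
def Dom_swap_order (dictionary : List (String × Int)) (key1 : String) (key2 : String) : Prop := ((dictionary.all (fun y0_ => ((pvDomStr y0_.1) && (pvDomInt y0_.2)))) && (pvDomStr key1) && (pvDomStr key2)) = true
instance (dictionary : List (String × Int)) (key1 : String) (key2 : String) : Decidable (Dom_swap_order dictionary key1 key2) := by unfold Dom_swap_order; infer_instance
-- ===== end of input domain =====

-- B computes the swapped key order first (index both keys, swap the two positions) and builds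
-- the dict in one comprehension, instead of A's conditional per-key renaming loop; objective: simpler.


-- ===== PORT A =====
-- `new_key = key1 if key == key2 else key2 if key == key1 else key`
def pvNewKey (key1 key2 k : String) : String :=
  if k == key2 then key1 else if k == key1 then key2 else k

-- literal port of A: iterate over the dict's keys, insert the renamed key with
-- `dictionary[new_key]` (under Pre_ both keys are present, so the KeyError totalizer
-- default 0 in getD is never used); the ValueError guard is Pre_'s to exclude.
def swap_order (dictionary : List (String × Int)) (key1 : String) (key2 : String) : List (String × Int) :=
  let d : PySem.Dict String Int := PySem.Dict.mk dictionary
  (dictionary.foldl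
    (fun new_dict p =>
      let new_key := pvNewKey key1 key2 p.1
      new_dict.insert new_key (d.getD new_key 0))
    PySem.Dict.empty).items

-- ===== PORT B =====
-- literal port of Source B: keys = list(dictionary); i, j = keys.index(key1), keys.index(key2);
-- swap positions i and j; one comprehension. `none` from index? = the ValueError branch (outside Pre_).
def swap_order_alt (dictionary : List (String × Int)) (key1 : String) (key2 : String) : List (String × Int) :=
  let keys := dictionary.map Prod.fst
  match PySem.List.index? keys key1, PySem.List.index? keys key2 with
  | some i, some j =>
      let d : PySem.Dict String Int := PySem.Dict.mk dictionary
      let keys' := (keys.set i (keys.getD j "")).set j (keys.getD i "")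
      keys'.map (fun k => (k, d.getD k 0))
  | _, _ => []

-- ===== PRECONDITION & SPEC =====
-- Pre_ excludes inputs where A raises ValueError (key1 or key2 absent) and association lists with
-- duplicate keys, which a Python dict cannot represent (the list is the dict's items).
def Pre_swap_order (dictionary : List (String × Int)) (key1 : String) (key2 : String) : Prop :=
  (dictionary.map Prod.fst).Nodup ∧ key1 ∈ dictionary.map Prod.fst ∧ key2 ∈ dictionary.map Prod.fst
instance (dictionary : List (String × Int)) (key1 : String) (key2 : String) : Decidable (Pre_swap_order dictionary key1 key2) := by unfold Pre_swap_order; infer_instance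

def pvWitness_swap_order : (List (String × Int)) × String × String := ([("a", 1), ("b", 2), ("c", 3)], "a", "c")

def Spec_swap_order (dictionary : List (String × Int)) (key1 : String) (key2 : String) (out : List (String × Int)) : Prop := out = swap_order_alt dictionary key1 key2
instance (dictionary : List (String × Int)) (key1 : String) (key2 : String) (out : List (String × Int)) : Decidable (Spec_swap_order dictionary key1 key2 out) := by unfold Spec_swap_order; infer_instance

-- ===== CLAIM (what is proved, stated in full; the proofs are below) =====
def Claim_equal_swap_order : Prop := ∀ (dictionary : List (String × Int)) (key1 : String) (key2 : String), Dom_swap_order dictionary key1 key2 → Pre_swap_order dictionary key1 key2 → Spec_swap_order dictionary key1 key2 (swap_order dictionary key1 key2)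

-- ===== LEMMAS AND PROOFS =====

-- pvNewKey is an involution, hence injective.
theorem pvNewKey_invol (key1 key2 k : String) : pvNewKey key1 key2 (pvNewKey key1 key2 k) = k := by
  unfold pvNewKey
  split_ifs <;> simp_all

theorem pvNewKey_injective (key1 key2 : String) : Function.Injective (pvNewKey key1 key2) := by
  intro x y h
  have := congrArg (pvNewKey key1 key2) h
  rwa [pvNewKey_invol, pvNewKey_invol] at this

-- mapping pvNewKey over a nodup key list equals swapping the two indexed positions
theorem map_pvNewKey_eq_swap (keys : List String) (key1 key2 : String) (i j : Nat)
    (hnd : keys.Nodup)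
    (hi : PySem.List.index? keys key1 = some i)
    (hj : PySem.List.index? keys key2 = some j) :
    keys.map (pvNewKey key1 key2) = (keys.set i (keys.getD j "")).set j (keys.getD i "") := by
  obtain ⟨hilt, hki, -⟩ := PySem.List.getElem_of_index?_eq_some hi
  obtain ⟨hjlt, hkj, -⟩ := PySem.List.getElem_of_index?_eq_some hj
  apply List.ext_getElem
  · simp
  · intro m hm₁ hm₂
    have hmlt : m < keys.length := by simpa using hm₁
    have hDi : keys.getD i "" = keys[i] := List.getD_eq_getElem keys "" hilt
    have hDj : keys.getD j "" = keys[j] := List.getD_eq_getElem keys "" hjlt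
    have hinj : ∀ {a b : Nat} (ha : a < keys.length) (hb : b < keys.length), keys[a]'ha = keys[b]'hb → a = b := by
      intro a b ha hb h
      exact hnd.getElem_inj_iff.mp h
    simp only [List.getElem_map, List.getElem_set, hDi, hDj]
    by_cases hmj : j = m
    · subst hmj
      rw [if_pos rfl, hkj, hki]
      simp [pvNewKey]
    · by_cases hmi : i = m
      · subst hmi
        rw [if_neg hmj, if_pos rfl, hkj]
        have hne : key1 ≠ key2 := fun h => hmj (hinj hjlt hilt (by rw [hkj, hki, h]))
        rw [hki]
        simp [pvNewKey, hne]
      · rw [if_neg hmj, if_neg hmi]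
        have h2 : keys[m] ≠ key2 := fun h => hmj (hinj hjlt hmlt (hkj.trans h.symm))
        have h1 : keys[m] ≠ key1 := fun h => hmi (hinj hilt hmlt (hki.trans h.symm))
        simp [pvNewKey, h1, h2]

-- ===== VERDICT (by name: the statement is the Claim_ definition above) =====
theorem swap_order_spec : Claim_equal_swap_order := by
  intro dictionary key1 key2 _ ⟨hnd, h1, h2⟩
  unfold Spec_swap_order swap_order swap_order_alt
  obtain ⟨i, hi⟩ := Option.isSome_iff_exists.mp ((PySem.List.index?_isSome_iff _ _).mpr h1)
  obtain ⟨j, hj⟩ := Option.isSome_iff_exists.mp ((PySem.List.index?_isSome_iff _ _).mpr h2)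
  simp only [hi, hj]
  have hfresh : ∀ p ∈ dictionary,
      (PySem.Dict.empty : PySem.Dict String Int).contains (pvNewKey key1 key2 p.1) = false := by
    intro p _; exact PySem.Dict.contains_empty _
  have hmapnd : (dictionary.map (fun p => pvNewKey key1 key2 p.1)).Nodup := by
    have : dictionary.map (fun p => pvNewKey key1 key2 p.1)
        = (dictionary.map Prod.fst).map (pvNewKey key1 key2) := by
      simp [List.map_map, Function.comp]
    rw [this]
    exact hnd.map (pvNewKey_injective key1 key2)
  rw [PySem.Dict.items_foldl_insert_fresh dictionary
      (fun p => pvNewKey key1 key2 p.1)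
      (fun p => (PySem.Dict.mk dictionary).getD (pvNewKey key1 key2 p.1) 0)
      PySem.Dict.empty hfresh hmapnd]
  rw [← map_pvNewKey_eq_swap (dictionary.map Prod.fst) key1 key2 i j hnd hi hj]
  simp [PySem.Dict.empty, List.map_map, Function.comp_def]
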